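-- pv_equiv track=rewrite | github.com/simsmile123/AI | l02/ranjan_s_u2_lfour.py | sudoku_neighbors
-- ===== SOURCE A (Python) =====
-- def sudoku_neighbors(csp_table): # {0:[0, 1, 2, 3, 4, ...., 8, 9, 18, 27, 10, 11, 19, 20], 1:
--    ''' Your code goes here ''' #DICT of each index
--    neighbors = {}
--    for x in range(81):
--       value_set = set()
--       for y in csp_table:
--             if x in y:
--                 for val in y:
--                    value_set.add(val)
--       value_set-={x}
--       neighbors[x] = value_set
--    return neighbors
-- # Optional helper function
-- # def initialize_ds(puzzle, neighbors):
-- #    ''' Your code goes here '''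
-- #    #print (vars, puzzle, q_table)
-- #    variables = {}
-- #    num_count = 0
-- #    q_table = {'.': 0, '1': 0, '2': 0, '3': 0, '4': 0, '5': 0, '6': 0, '7':0, '8':0, '9':0}
-- #    for x in range(len(puzzle)):
-- #       #if x != '.':
-- #       num_count = puzzle.count(puzzle[x])
-- #       q_table[puzzle[x]] =num_count
-- #       num_v ={'1','2','3','4','5','6','7','8','9'}
-- #       if puzzle[x] == '.':
-- #           for z in neighbors[int(x)]:
-- #               if puzzle[z] in num_v: #;lkjad;lkfja;sldkfjlasdkfjj
-- #                   num_v.remove(puzzle[z])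
-- #           variables[x]=num_v
-- #       else:
-- #           variables[x] = list(puzzle[x])
-- #    del q_table['.']
--
--    return variables,puzzle, q_table #{}, "", {} #what do you do for vars here
-- ===== SOURCE B (Python) =====
-- def sudoku_neighbors(csp_table):
--     # One pass over the groups: each group's members are added to every
--     # in-range member's neighbor set; finally each cell discards itself.
--     neighbors = {x: set() for x in range(81)}
--     for y in csp_table:
--         for v in y:
--             if 0 <= v < 81:
--                 neighbors[v].update(y)
--     for x in range(81):
--         neighbors[x].discard(x)
--     return neighbors
-- ===== Notes on version B (the rewrite author's own statement) =====
-- stated objective: faster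
-- what changed: B replaces A's 81 full rescans of the constraint table (one per cell) with a single pass over the groups that scatters each group's members into every in-range member's neighbor set, then discards each cell from its own set.
import Mathlib
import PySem

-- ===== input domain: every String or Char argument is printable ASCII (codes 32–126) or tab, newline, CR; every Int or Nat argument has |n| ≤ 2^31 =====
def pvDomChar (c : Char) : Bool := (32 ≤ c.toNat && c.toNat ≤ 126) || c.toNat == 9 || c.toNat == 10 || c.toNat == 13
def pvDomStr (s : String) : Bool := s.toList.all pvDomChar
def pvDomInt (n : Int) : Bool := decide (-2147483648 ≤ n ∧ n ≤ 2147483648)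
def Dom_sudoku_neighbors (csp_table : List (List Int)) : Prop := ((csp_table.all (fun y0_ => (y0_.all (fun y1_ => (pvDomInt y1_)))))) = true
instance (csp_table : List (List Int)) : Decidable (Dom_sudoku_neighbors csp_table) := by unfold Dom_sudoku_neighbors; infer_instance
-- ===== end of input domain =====

-- B builds all 81 neighbor sets in one pass over the constraint groups (per-group scatter)
-- instead of A's per-cell rescan of the whole table; same return value, proved equal.


-- ===== PORT A =====
-- for x in range(81): scan every group; if x in it, add all its values; drop x; neighbors[x] = set
def sudoku_neighbors (csp_table : List (List Int)) : List (Int × List Int) :=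
  ((PySem.List.pyRange 0 81 1).foldl (fun neighbors x =>
      let value_set : PySem.Set Int :=
        csp_table.foldl (fun vs y =>
          if x ∈ y then y.foldl (fun s val => PySem.Set.add s val) vs else vs)
          PySem.Set.empty
      let value_set := PySem.Set.diff value_set (PySem.Set.ofList [x])  -- value_set -= {x}
      neighbors.insert x value_set)
    PySem.Dict.empty).items

-- ===== PORT B =====
-- neighbors = {x: set()}; one pass: each group's members go into every in-range member's set;
-- finally each cell discards itself.  neighbors[v].update(y) is modify at the (present) key v.
def sudoku_neighbors_alt (csp_table : List (List Int)) : List (Int × List Int) :=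
  let init : PySem.Dict Int (PySem.Set Int) :=
    (PySem.List.pyRange 0 81 1).foldl (fun d x => d.insert x PySem.Set.empty) PySem.Dict.empty
  let nb1 := csp_table.foldl (fun d y =>
      y.foldl (fun d v =>
        if 0 ≤ v ∧ v < 81 then d.modify v PySem.Set.empty (fun s => PySem.Set.update s y) else d)
        d)
    init
  let nb2 := (PySem.List.pyRange 0 81 1).foldl (fun d x =>
      d.modify x PySem.Set.empty (fun s => PySem.Set.discard s x)) nb1
  nb2.items

-- ===== PRECONDITION & SPEC =====
def Spec_sudoku_neighbors (csp_table : List (List Int)) (out : List (Int × List Int)) : Prop := out = sudoku_neighbors_alt csp_table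
instance (csp_table : List (List Int)) (out : List (Int × List Int)) : Decidable (Spec_sudoku_neighbors csp_table out) := by unfold Spec_sudoku_neighbors; infer_instance

-- ===== CLAIM =====
def Claim_equal_sudoku_neighbors : Prop := ∀ (csp_table : List (List Int)), Dom_sudoku_neighbors csp_table → Spec_sudoku_neighbors csp_table (sudoku_neighbors csp_table)

-- ===== LEMMAS AND PROOFS =====

-- set difference with a singleton is discard
theorem pv_diff_singleton (s : PySem.Set Int) (x : Int) :
    PySem.Set.diff s (PySem.Set.ofList [x]) = PySem.Set.discard s x := by
  have h : PySem.Set.ofList [x] = [x] := rfl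
  unfold PySem.Set.diff PySem.Set.discard
  rw [h]
  apply List.filter_congr
  intro a _
  simp only [PySem.Set.contains_eq_listContains, List.contains_cons, List.contains_nil,
             Bool.or_false]

-- updating with the same list twice is updating once
theorem pv_update_idem (s : PySem.Set Int) (xs : List Int) :
    PySem.Set.update (PySem.Set.update s xs) xs = PySem.Set.update s xs := by
  rw [PySem.Set.update_eq_append_filter (PySem.Set.update s xs) xs]
  have h : List.filter (fun y => !(PySem.Set.update s xs).contains y) (PySem.Set.ofList xs) = [] := by
    rw [List.filter_eq_nil_iff]
    intro a ha
    have : a ∈ PySem.Set.update s xs := by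
      rw [PySem.Set.mem_update]
      exact Or.inr ((PySem.Set.mem_ofList xs a).mp ha)
    have hc : (PySem.Set.update s xs).contains a = true := by
      simp only [PySem.Set.contains_eq_listContains]
      simpa using this
    show ¬(!(PySem.Set.update s xs).contains a) = true
    rw [hc]
    decide
  rw [h, List.append_nil]

-- items of a fold of inserts of fresh distinct keys
theorem pv_foldl_insert_items {ν : Type} (g : Int → ν) :
    ∀ (ks : List Int) (d : PySem.Dict Int ν), ks.Nodup →
      (∀ k ∈ ks, d.contains k = false) →
      (ks.foldl (fun d x => d.insert x (g x)) d).items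
        = d.items ++ ks.map (fun x => (x, g x)) := by
  intro ks
  induction ks with
  | nil => intro d _ _; simp
  | cons k ks ih =>
    intro d hnd hfresh
    have hk : d.contains k = false := hfresh k (List.mem_cons_self)
    have h1 : (d.insert k (g k)).items = d.items ++ [(k, g k)] :=
      PySem.Dict.items_insert_of_not_contains d (g k) hk
    have h2 : ∀ k' ∈ ks, (d.insert k (g k)).contains k' = false := by
      intro k' hk'
      rw [PySem.Dict.contains_insert]
      have hne : k' ≠ k := fun h => (List.nodup_cons.mp hnd).1 (h ▸ hk')
      simp [hne, hfresh k' (List.mem_cons_of_mem _ hk')]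
    calc (List.foldl (fun d x => d.insert x (g x)) d (k :: ks)).items
        = (List.foldl (fun d x => d.insert x (g x)) (d.insert k (g k)) ks).items := rfl
      _ = (d.insert k (g k)).items ++ ks.map (fun x => (x, g x)) :=
          ih (d.insert k (g k)) (List.nodup_cons.mp hnd).2 h2
      _ = d.items ++ (k :: ks).map (fun x => (x, g x)) := by rw [h1]; simp

-- items of a dict with Nodup keys as a map over its keys
theorem pv_items_eq_map_getD {ν : Type} (d : PySem.Dict Int ν) (hnd : d.keys.Nodup) (dflt : ν) :
    d.items = d.keys.map (fun k => (k, d.getD k dflt)) := by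
  apply List.ext_getElem
  · simp [PySem.Dict.keys]
  · intro i h1 h2
    have hk : i < d.keys.length := by simp at h2; exact h2
    have hkey : d.keys[i]'hk = (d.items[i]'h1).1 := by
      simp [PySem.Dict.keys]
    have hmem : d.items[i]'h1 ∈ d.items := List.getElem_mem h1
    have hmem' : ((d.items[i]'h1).1, (d.items[i]'h1).2) ∈ d.items := by
      rw [show ((d.items[i]'h1).1, (d.items[i]'h1).2) = d.items[i]'h1 from rfl]
      exact hmem
    have hgd : d.getD (d.items[i]'h1).1 dflt = (d.items[i]'h1).2 :=
      PySem.Dict.getD_of_mem_items d hmem' hnd dflt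
    rw [List.getElem_map]
    refine Prod.ext ?_ ?_
    · exact hkey.symm
    · show (d.items[i]'h1).2 = d.getD (d.keys[i]'hk) dflt
      rw [hkey, hgd]

-- keys are preserved by the inner scatter loop (all keys 0..80 present)
theorem pv_keys_inner (y : List Int) :
    ∀ (l : List Int) (d : PySem.Dict Int (PySem.Set Int)),
      d.keys = PySem.List.pyRange 0 81 1 →
      (l.foldl (fun d v =>
        if 0 ≤ v ∧ v < 81 then d.modify v PySem.Set.empty (fun s => PySem.Set.update s y) else d)
        d).keys = PySem.List.pyRange 0 81 1 := by
  intro l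
  induction l with
  | nil => intro d hd; simpa using hd
  | cons v l ih =>
    intro d hd
    by_cases hv : 0 ≤ v ∧ v < 81
    · have hc : d.contains v = true := by
        rw [PySem.Dict.contains_iff_mem_keys, hd, PySem.List.mem_pyRange_one]
        exact ⟨hv.1, hv.2⟩
      have hk : (d.modify v PySem.Set.empty (fun s => PySem.Set.update s y)).keys = d.keys := by
        rw [PySem.Dict.keys_modify, PySem.Dict.keys_insert_of_contains _ _ hc]
      simp only [List.foldl_cons, if_pos hv]
      exact ih _ (hk.trans hd)
    · simp only [List.foldl_cons, if_neg hv]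
      exact ih d hd

theorem pv_keys_outer (csp : List (List Int)) :
    ∀ (d : PySem.Dict Int (PySem.Set Int)),
      d.keys = PySem.List.pyRange 0 81 1 →
      (csp.foldl (fun d y =>
        y.foldl (fun d v =>
          if 0 ≤ v ∧ v < 81 then d.modify v PySem.Set.empty (fun s => PySem.Set.update s y) else d)
          d) d).keys = PySem.List.pyRange 0 81 1 := by
  induction csp with
  | nil => intro d hd; simpa using hd
  | cons y csp ih =>
    intro d hd
    exact ih _ (pv_keys_inner y y d hd)

-- getD after the inner scatter loop
theorem pv_inner_getD (y : List Int) (x : Int) (hx : 0 ≤ x ∧ x < 81) :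
    ∀ (l : List Int) (d : PySem.Dict Int (PySem.Set Int)),
      (l.foldl (fun d v =>
        if 0 ≤ v ∧ v < 81 then d.modify v PySem.Set.empty (fun s => PySem.Set.update s y) else d)
        d).getD x PySem.Set.empty
      = if x ∈ l then PySem.Set.update (d.getD x PySem.Set.empty) y
        else d.getD x PySem.Set.empty := by
  intro l
  induction l with
  | nil => intro d; simp
  | cons v l ih =>
    intro d
    by_cases hv : 0 ≤ v ∧ v < 81
    · simp only [List.foldl_cons, if_pos hv]
      rw [ih]
      by_cases hxv : x = v
      · subst hxv
        rw [PySem.Dict.getD_modify]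
        simp [pv_update_idem]
      · rw [PySem.Dict.getD_modify]
        simp [hxv, List.mem_cons]
    · simp only [List.foldl_cons, if_neg hv]
      rw [ih]
      have hxv : x ≠ v := fun h => hv (h ▸ hx)
      simp [List.mem_cons, hxv]

-- getD after the outer pass equals A's per-cell accumulation
theorem pv_outer_getD (x : Int) (hx : 0 ≤ x ∧ x < 81) :
    ∀ (csp : List (List Int)) (d : PySem.Dict Int (PySem.Set Int)),
      (csp.foldl (fun d y =>
        y.foldl (fun d v =>
          if 0 ≤ v ∧ v < 81 then d.modify v PySem.Set.empty (fun s => PySem.Set.update s y) else d)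
          d) d).getD x PySem.Set.empty
      = csp.foldl (fun vs y => if x ∈ y then PySem.Set.update vs y else vs)
          (d.getD x PySem.Set.empty) := by
  intro csp
  induction csp with
  | nil => intro d; simp
  | cons y csp ih =>
    intro d
    simp only [List.foldl_cons]
    rw [ih, pv_inner_getD y x hx y d]

-- the final discard loop leaves keys not in the list alone …
theorem pv_discard_getD_not_mem (x : Int) :
    ∀ (ks : List Int) (d : PySem.Dict Int (PySem.Set Int)), x ∉ ks →
      (ks.foldl (fun d k => d.modify k PySem.Set.empty (fun s => PySem.Set.discard s k)) d).getD x PySem.Set.empty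
      = d.getD x PySem.Set.empty := by
  intro ks
  induction ks with
  | nil => intro d _; rfl
  | cons k ks ih =>
    intro d hx
    have hxk : x ≠ k := fun h => hx (h ▸ List.mem_cons_self)
    simp only [List.foldl_cons]
    rw [ih _ (fun h => hx (List.mem_cons_of_mem _ h)), PySem.Dict.getD_modify]
    simp [hxk]

-- … and discards exactly once at each listed key
theorem pv_discard_getD (x : Int) :
    ∀ (ks : List Int) (d : PySem.Dict Int (PySem.Set Int)), ks.Nodup → x ∈ ks →
      (ks.foldl (fun d k => d.modify k PySem.Set.empty (fun s => PySem.Set.discard s k)) d).getD x PySem.Set.empty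
      = PySem.Set.discard (d.getD x PySem.Set.empty) x := by
  intro ks
  induction ks with
  | nil => intro d _ h; exact absurd h (List.not_mem_nil)
  | cons k ks ih =>
    intro d hnd hx
    simp only [List.foldl_cons]
    by_cases hxk : x = k
    · subst hxk
      rw [pv_discard_getD_not_mem x ks _ (List.nodup_cons.mp hnd).1, PySem.Dict.getD_modify]
      simp
    · have hx' : x ∈ ks := by
        rcases List.mem_cons.mp hx with h | h
        · exact absurd h hxk
        · exact h
      rw [ih _ (List.nodup_cons.mp hnd).2 hx']
      rw [PySem.Dict.getD_modify]
      simp [hxk]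

theorem pv_keys_discard (ks : List Int) :
    ∀ (d : PySem.Dict Int (PySem.Set Int)),
      d.keys = PySem.List.pyRange 0 81 1 →
      (∀ k ∈ ks, (0:Int) ≤ k ∧ k < 81) →
      (ks.foldl (fun d k => d.modify k PySem.Set.empty (fun s => PySem.Set.discard s k)) d).keys
        = PySem.List.pyRange 0 81 1 := by
  induction ks with
  | nil => intro d hd _; simpa using hd
  | cons k ks ih =>
    intro d hd hks
    have hc : d.contains k = true := by
      rw [PySem.Dict.contains_iff_mem_keys, hd, PySem.List.mem_pyRange_one]
      exact hks k List.mem_cons_self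
    have hk : (d.modify k PySem.Set.empty (fun s => PySem.Set.discard s k)).keys = d.keys := by
      rw [PySem.Dict.keys_modify, PySem.Dict.keys_insert_of_contains _ _ hc]
    simp only [List.foldl_cons]
    exact ih _ (hk.trans hd) (fun k' h => hks k' (List.mem_cons_of_mem _ h))

-- the init dict: items, keys and lookups
theorem pv_init_items :
    ((PySem.List.pyRange 0 81 1).foldl (fun d x => d.insert x (PySem.Set.empty : PySem.Set Int)) PySem.Dict.empty).items
      = (PySem.List.pyRange 0 81 1).map (fun x => (x, (PySem.Set.empty : PySem.Set Int))) := by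
  have := pv_foldl_insert_items (fun _ : Int => (PySem.Set.empty : PySem.Set Int))
    (PySem.List.pyRange 0 81 1) PySem.Dict.empty (PySem.List.nodup_pyRange_one 0 81)
    (fun k _ => PySem.Dict.contains_empty k)
  simpa using this

theorem pv_init_keys :
    ((PySem.List.pyRange 0 81 1).foldl (fun d x => d.insert x (PySem.Set.empty : PySem.Set Int)) PySem.Dict.empty).keys
      = PySem.List.pyRange 0 81 1 := by
  show List.map (fun p => p.1)
      ((PySem.List.pyRange 0 81 1).foldl (fun d x => d.insert x (PySem.Set.empty : PySem.Set Int)) PySem.Dict.empty).items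
    = PySem.List.pyRange 0 81 1
  rw [pv_init_items]
  rw [List.map_map]
  rw [show ((fun p => (p.1 : Int)) ∘ fun x : Int => (x, (PySem.Set.empty : PySem.Set Int))) = (fun x => x) from rfl]
  exact List.map_id' _

theorem pv_init_getD (x : Int) (hx : x ∈ PySem.List.pyRange 0 81 1) :
    ((PySem.List.pyRange 0 81 1).foldl (fun d x => d.insert x (PySem.Set.empty : PySem.Set Int)) PySem.Dict.empty).getD x PySem.Set.empty
      = PySem.Set.empty := by
  apply PySem.Dict.getD_of_mem_items
  · rw [pv_init_items]
    exact List.mem_map.mpr ⟨x, hx, rfl⟩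
  · rw [pv_init_keys]; exact PySem.List.nodup_pyRange_one 0 81

-- keys and lookups of B's finished dict
theorem pv_nb2_keys (csp : List (List Int)) :
    ((PySem.List.pyRange 0 81 1).foldl (fun d x =>
        d.modify x PySem.Set.empty (fun s => PySem.Set.discard s x))
      (csp.foldl (fun d y =>
        y.foldl (fun d v =>
          if 0 ≤ v ∧ v < 81 then d.modify v PySem.Set.empty (fun s => PySem.Set.update s y) else d)
          d)
        ((PySem.List.pyRange 0 81 1).foldl (fun d x => d.insert x (PySem.Set.empty : PySem.Set Int)) PySem.Dict.empty))).keys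
    = PySem.List.pyRange 0 81 1 := by
  apply pv_keys_discard
  · exact pv_keys_outer csp _ pv_init_keys
  · intro k hk
    exact (PySem.List.mem_pyRange_one).mp hk

theorem pv_nb2_getD (csp : List (List Int)) (x : Int) (hx : x ∈ PySem.List.pyRange 0 81 1) :
    ((PySem.List.pyRange 0 81 1).foldl (fun d x =>
        d.modify x PySem.Set.empty (fun s => PySem.Set.discard s x))
      (csp.foldl (fun d y =>
        y.foldl (fun d v =>
          if 0 ≤ v ∧ v < 81 then d.modify v PySem.Set.empty (fun s => PySem.Set.update s y) else d)
          d)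
        ((PySem.List.pyRange 0 81 1).foldl (fun d x => d.insert x (PySem.Set.empty : PySem.Set Int)) PySem.Dict.empty))).getD x PySem.Set.empty
    = PySem.Set.discard
        (csp.foldl (fun vs y => if x ∈ y then PySem.Set.update vs y else vs) PySem.Set.empty) x := by
  have hx' := (PySem.List.mem_pyRange_one).mp hx
  rw [pv_discard_getD x (PySem.List.pyRange 0 81 1) _ (PySem.List.nodup_pyRange_one 0 81) hx,
      pv_outer_getD x hx' csp _, pv_init_getD x hx]

-- ===== VERDICT =====
theorem sudoku_neighbors_spec : Claim_equal_sudoku_neighbors := by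
  intro csp _
  unfold Spec_sudoku_neighbors
  show sudoku_neighbors csp = sudoku_neighbors_alt csp
  unfold sudoku_neighbors sudoku_neighbors_alt
  simp only []
  rw [pv_foldl_insert_items
        (fun x => PySem.Set.diff
          (csp.foldl (fun vs y =>
            if x ∈ y then y.foldl (fun s val => PySem.Set.add s val) vs else vs) PySem.Set.empty)
          (PySem.Set.ofList [x]))
        (PySem.List.pyRange 0 81 1) PySem.Dict.empty (PySem.List.nodup_pyRange_one 0 81)
        (fun k _ => PySem.Dict.contains_empty k)]
  have he : (PySem.Dict.empty : PySem.Dict Int (PySem.Set Int)).items = [] := rfl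
  rw [he, List.nil_append]
  rw [pv_items_eq_map_getD _ (by rw [pv_nb2_keys]; exact PySem.List.nodup_pyRange_one 0 81) PySem.Set.empty,
      pv_nb2_keys]
  apply List.map_congr_left
  intro x hx
  refine Prod.ext rfl ?_
  show PySem.Set.diff _ (PySem.Set.ofList [x]) = _
  rw [pv_diff_singleton, pv_nb2_getD csp x hx]
  rfl
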